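-- pv_equiv track=rewrite | github.com/sethbroberts/fundamentals_of_measurement | fom.py | make_correspondance_from_mapping_range_to_equivalence_classes
-- ===== SOURCE A (Python) =====
-- def make_correspondance_from_mapping_range_to_equivalence_classes(mapping):
--     "Given a mapping, show correspondence between mapping range and equivalence classes of the associated equivalence relation"
--     range2items = {}
--     for s, r in mapping:
--         if not r in range2items:
--             range2items[r] = []
--         range2items[r].append(s)
--     correspondence = []
--     for r in range2items:
--         ec = range2items[r]
--         correspondence.append((r, ec))
--     correspondence.sort()
--     return correspondence
-- ===== SOURCE B (Python) =====
-- def make_correspondance_from_mapping_range_to_equivalence_classes(mapping):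
--     "Given a mapping, show correspondence between mapping range and equivalence classes of the associated equivalence relation"
--     keys = sorted({r for _, r in mapping})
--     return [(r, [s for s, rr in mapping if rr == r]) for r in keys]
-- ===== Notes on version B (the rewrite author's own statement) =====
-- stated objective: simpler
-- what changed: Replaces the dict-accumulation loop plus a sort of the assembled (r, class) pairs by sorting the distinct range values once and building each equivalence class with a per-key filter comprehension (no dict, no pair sort).
import Mathlib
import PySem

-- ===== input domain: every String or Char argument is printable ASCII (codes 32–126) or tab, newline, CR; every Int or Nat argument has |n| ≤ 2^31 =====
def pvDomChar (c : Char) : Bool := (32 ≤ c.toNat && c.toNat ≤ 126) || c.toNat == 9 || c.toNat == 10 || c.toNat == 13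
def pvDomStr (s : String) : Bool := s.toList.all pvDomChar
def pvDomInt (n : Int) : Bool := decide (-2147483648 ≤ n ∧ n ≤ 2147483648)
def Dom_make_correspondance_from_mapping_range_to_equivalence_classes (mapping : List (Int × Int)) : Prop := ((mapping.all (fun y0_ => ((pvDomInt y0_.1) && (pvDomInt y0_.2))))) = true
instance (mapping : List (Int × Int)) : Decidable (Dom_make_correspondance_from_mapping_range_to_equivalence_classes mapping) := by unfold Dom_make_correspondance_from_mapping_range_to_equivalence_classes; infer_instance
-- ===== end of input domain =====

-- B replaces A's dict-accumulation loop and pair sort by sorting the distinct range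
-- values once and building each class with a per-key filter (objective: simpler).

-- ===== PORT A =====
-- the dict-building loop: 'if not r in range2items: range2items[r] = []' then 'range2items[r].append(s)'
def make_correspondance_from_mapping_range_to_equivalence_classes (mapping : List (Int × Int)) : List (Int × List Int) :=
  let range2items : PySem.Dict Int (List Int) :=
    mapping.foldl (fun d p =>
      let d := if d.contains p.2 then d else d.insert p.2 ([] : List Int)
      d.modify p.2 [] (fun ec => ec ++ [p.1])) PySem.Dict.empty
  -- 'for r in range2items: ec = range2items[r]; correspondence.append((r, ec))'
  -- (range2items[r] is getD with any default: exact, since r is a key of the dict)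
  let correspondence :=
    range2items.keys.foldl (fun acc r => acc ++ [(r, range2items.getD r [])]) []
  -- 'correspondence.sort()': Python compares the tuples lexicographically, but dict keys
  -- are distinct, so the comparison never reaches the list component — exact as sort by .1
  PySem.List.sorted correspondence (fun x => x.1)

-- ===== PORT B =====
def make_correspondance_from_mapping_range_to_equivalence_classes_alt (mapping : List (Int × Int)) : List (Int × List Int) :=
  let keys := PySem.List.sorted (PySem.Set.ofList (mapping.map (fun p => p.2))) (fun x => x)
  keys.map (fun r => (r, (mapping.filter (fun p => p.2 == r)).map (fun p => p.1)))

-- ===== PRECONDITION & SPEC =====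
def Spec_make_correspondance_from_mapping_range_to_equivalence_classes (mapping : List (Int × Int)) (out : List (Int × List Int)) : Prop := out = make_correspondance_from_mapping_range_to_equivalence_classes_alt mapping
instance (mapping : List (Int × Int)) (out : List (Int × List Int)) : Decidable (Spec_make_correspondance_from_mapping_range_to_equivalence_classes mapping out) := by unfold Spec_make_correspondance_from_mapping_range_to_equivalence_classes; infer_instance

-- ===== CLAIM (what is proved, stated in full; the proofs are below) =====
def Claim_equal_make_correspondance_from_mapping_range_to_equivalence_classes : Prop := ∀ (mapping : List (Int × Int)), Dom_make_correspondance_from_mapping_range_to_equivalence_classes mapping → Spec_make_correspondance_from_mapping_range_to_equivalence_classes mapping (make_correspondance_from_mapping_range_to_equivalence_classes mapping)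

-- ===== LEMMAS AND PROOFS =====

-- A's loop body ('insert [] if absent, then append') is one Dict.modify.
theorem pv_step_eq (d : PySem.Dict Int (List Int)) (p : Int × Int) :
    (if d.contains p.2 then d else d.insert p.2 ([] : List Int)).modify p.2 []
        (fun ec => ec ++ [p.1])
      = d.modify p.2 [] (fun ec => ec ++ [p.1]) := by
  by_cases h : d.contains p.2
  · simp [h]
  · simp only [h, Bool.false_eq_true, if_false]
    apply PySem.Dict.ext
    simp only [Bool.not_eq_true] at h
    have hnk : ∀ q ∈ d.items, (q.1 == p.2) = false := by
      intro q hq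
      by_contra hc
      simp only [Bool.not_eq_false] at hc
      have : d.contains p.2 = true := by
        simp only [PySem.Dict.contains, List.any_eq_true]
        exact ⟨q, hq, hc⟩
      simp [this] at h
    have hget : d.getD p.2 [] = [] := by
      simp only [PySem.Dict.getD, PySem.Dict.get?]
      rw [List.find?_eq_none.mpr (fun q hq => by simp [hnk q hq])]
      rfl
    simp only [PySem.Dict.modify, hget, PySem.Dict.getD_insert_self]
    rw [PySem.Dict.items_insert_of_contains _ _ (PySem.Dict.contains_insert_self d p.2 []),
        PySem.Dict.items_insert_of_not_contains _ _ h,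
        PySem.Dict.items_insert_of_not_contains _ _ h]
    rw [List.map_append]
    congr 1
    · calc List.map (fun q => if (q.1 == p.2) = true then (p.2, ([] : List Int) ++ [p.1]) else q) d.items
          = d.items.map id := List.map_congr_left (fun q hq => by simp [hnk q hq])
        _ = d.items := List.map_id _
    · simp

-- the whole dict fold is the plain 'modify' fold
theorem pv_fold_eq (mapping : List (Int × Int)) (d : PySem.Dict Int (List Int)) :
    mapping.foldl (fun d p =>
        (if d.contains p.2 then d else d.insert p.2 ([] : List Int)).modify p.2 []
          (fun ec => ec ++ [p.1])) d
      = mapping.foldl (fun d p => d.modify p.2 [] (fun ec => ec ++ [p.1])) d := by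
  induction mapping generalizing d with
  | nil => rfl
  | cons p t ih => rw [List.foldl_cons, List.foldl_cons, pv_step_eq, ih]

theorem make_correspondance_eq (mapping : List (Int × Int)) :
    make_correspondance_from_mapping_range_to_equivalence_classes mapping
      = make_correspondance_from_mapping_range_to_equivalence_classes_alt mapping := by
  unfold make_correspondance_from_mapping_range_to_equivalence_classes
    make_correspondance_from_mapping_range_to_equivalence_classes_alt
  simp only [pv_fold_eq]
  set d := mapping.foldl (fun d p => d.modify p.2 [] (fun ec => ec ++ [p.1]))
      PySem.Dict.empty with hd
  have hkeys : d.keys = PySem.Set.ofList (mapping.map (fun p => p.2)) := by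
    rw [hd]
    have := PySem.Dict.keys_foldl_modify_key mapping (fun p => p.2) ([] : List Int)
      (fun _ p v => v ++ [p.1]) PySem.Dict.empty
    simpa [PySem.Set.update_nil_left, PySem.Dict.keys, PySem.Dict.empty] using this
  have hgetD : ∀ c : Int, d.getD c []
      = (mapping.filter (fun p => p.2 == c)).map (fun p => p.1) := by
    intro c
    have hswap : d = (mapping.map (fun p => (p.2, p.1))).foldl
        (fun d q => d.modify q.1 [] (fun ec => ec ++ [q.2])) PySem.Dict.empty := by
      rw [hd, List.foldl_map]
    rw [hswap, PySem.Dict.getD_foldl_modify_append]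
    simp [List.filter_map, List.map_map, Function.comp_def, PySem.Dict.empty,
      PySem.Dict.getD, PySem.Dict.get?]
  rw [PySem.List.foldl_append_singleton_eq_map, List.nil_append]
  have hcorr : d.keys.map (fun r => (r, d.getD r []))
      = (PySem.Set.ofList (mapping.map (fun p => p.2))).map
          (fun r => (r, (mapping.filter (fun p => p.2 == r)).map (fun p => p.1))) := by
    rw [hkeys]
    exact List.map_congr_left (fun r _ => by rw [hgetD])
  rw [hcorr]
  apply PySem.List.sorted_eq_of_perm_of_pairwise_lt
  · exact List.Perm.map _ (PySem.List.sorted_perm _ _ false)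
  · rw [List.pairwise_map]
    exact PySem.List.sorted_ofList_pairwise_lt _

-- ===== VERDICT (by name: the statement is the Claim_ definition above) =====
theorem make_correspondance_from_mapping_range_to_equivalence_classes_spec : Claim_equal_make_correspondance_from_mapping_range_to_equivalence_classes := by
  intro mapping _
  unfold Spec_make_correspondance_from_mapping_range_to_equivalence_classes
  exact make_correspondance_eq mapping
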